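-- pv_equiv track=rewrite | github.com/DailyCommitStudy/Kims-practice-repository | POJ/2019 카카오 개발자 겨울 인턴십/[Lv.1] 크레인 인형뽑기 게임.py | solution
-- ===== SOURCE A (Python) =====
-- def solution(board, moves):
--     answer = 0
--     case = [0]  # -1 인덱스 오류 방지
--
--     # 배열 회전 (행을 moves의 번호로 매칭하기 위해서)
--     board = list(zip(*board[::-1]))
--     board = [list(tup) for tup in board]
--
--     # 0 삭제 (필요없음)
--     for arr in board:
--         for i in range(arr.count(0)):
--             arr.remove(0)
--
--     for m in moves:
--         if board[m - 1]:  # m 위치에 인형이 있다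
--             doll = board[m - 1].pop()  # 인형 뽑기
--             if case[-1] == doll:  # 바구니에 넣으면 인형은 터지는가?
--                 case.pop()
--                 answer += 2
--             else:
--                 case.append(doll)
--
--     return answer
-- ===== SOURCE B (Python) =====
-- def solution(board, moves):
--     # Read-only board with per-column top pointers instead of rotating and
--     # materialising column stacks.
--     n = len(board)
--     w = len(board[0]) if board else 0
--     idx = [0] * w
--     basket = []
--     answer = 0
--     for m in moves:
--         col = m - 1
--         i = idx[col]
--         while i < n and board[i][col] == 0:
--             i += 1
--         if i < n:
--             doll = board[i][col]
--             idx[col] = i + 1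
--             if basket and basket[-1] == doll:
--                 basket.pop()
--                 answer += 2
--             else:
--                 basket.append(doll)
--     return answer
-- ===== Notes on version B (the rewrite author's own statement) =====
-- stated objective: alternative
-- what changed: B keeps the board read-only and tracks a per-column top-row pointer array, skipping zeros lazily at pick time, instead of rotating the board with zip, copying it, and deleting zeros with repeated list.remove before popping column stacks.
-- outside the precondition, e.g. on solution([[1, 2], [1]], [0, 0]): A returns 2, B returns 0
import Mathlib
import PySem

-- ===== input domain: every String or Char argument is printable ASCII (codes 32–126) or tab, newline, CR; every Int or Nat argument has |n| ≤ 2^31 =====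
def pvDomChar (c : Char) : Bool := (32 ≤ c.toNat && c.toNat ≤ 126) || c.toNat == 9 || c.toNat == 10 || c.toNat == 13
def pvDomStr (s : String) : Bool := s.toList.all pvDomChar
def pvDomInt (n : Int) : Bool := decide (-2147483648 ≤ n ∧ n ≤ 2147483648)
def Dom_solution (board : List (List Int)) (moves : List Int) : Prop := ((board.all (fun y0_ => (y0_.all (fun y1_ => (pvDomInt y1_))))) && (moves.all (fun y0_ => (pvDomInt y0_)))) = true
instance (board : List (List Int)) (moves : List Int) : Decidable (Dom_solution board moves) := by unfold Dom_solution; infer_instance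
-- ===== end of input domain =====

-- B replaces A's rotate-copy-and-delete-zeros preprocessing by read-only per-column top pointers; equivalence on rectangular boards with in-range moves.


-- ===== PORT A =====

-- list(zip(*rows)): hand-ported (PySem has no variadic zip); exact — truncates to the
-- shortest row, zip() of an empty argument list is empty.
def pyZipCols : List (List Int) → List (List Int)
  | [] => []
  | r :: rs =>
    if h : (r :: rs).all (fun x => !x.isEmpty) = true then
      ((r :: rs).map (fun x => x.headI)) :: pyZipCols ((r :: rs).map (fun x => x.tail))
    else []
termination_by rows => (match rows with | [] => 0 | r :: _ => r.length)
decreasing_by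
  simp only [List.all_cons, Bool.and_eq_true, Bool.not_eq_true', List.isEmpty_eq_false_iff] at h
  simp only [List.map_cons]
  cases r with
  | nil => exact absurd rfl h.1
  | cons a t => simp

-- A's main loop body over state (board-columns, case, answer)
def stepA (st : List (List Int) × List Int × Int) (m : Int) : List (List Int) × List Int × Int :=
  let (bd, cs, ans) := st
  match PySem.List.pyGet? bd (m - 1) with
  | none => st            -- board[m-1] IndexError: outside Pre_
  | some col =>
    if col = [] then st   -- 'if board[m - 1]:' falsy
    else
      match PySem.List.pop? col (-1) with   -- board[m-1].pop()
      | none => st        -- unreachable (col ≠ [])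
      | some (doll, col') =>
        let bd' := PySem.List.pySetD bd (m - 1) col'
        if PySem.List.pyGetD cs (-1) 0 = doll then   -- case[-1] == doll
          (bd', cs.dropLast, ans + 2)                -- case.pop(); answer += 2
        else
          (bd', cs ++ [doll], ans)                   -- case.append(doll)

def solution (board : List (List Int)) (moves : List Int) : Int :=
  -- board = list(zip(*board[::-1])); [list(tup) for tup in board] is the identity here
  let b1 := pyZipCols board.reverse
  -- for arr in board: for i in range(arr.count(0)): arr.remove(0)
  let b2 := b1.map (fun arr =>
    (List.range (PySem.List.count arr 0)).foldl
      (fun a _ => (PySem.List.remove? a 0).getD a) arr)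
  (moves.foldl stepA (b2, [0], 0)).2.2

-- ===== PORT B =====

-- while i < n and board[i][col] == 0: i += 1   (board read-only; col may be negative)
def skipZeros (board : List (List Int)) (col : Int) (i : Int) : Int :=
  if h : i < (board.length : Int) then
    match PySem.List.pyGet? board i with
    | some row =>
      match PySem.List.pyGet? row col with
      | some v => if v = 0 then skipZeros board col (i + 1) else i
      | none => i      -- board[i][col] IndexError: outside Pre_
    | none => i        -- unreachable for 0 ≤ i
  else i
termination_by ((board.length : Int) - i).toNat
decreasing_by omega

-- B's main loop body over state (idx, basket, answer)
def stepB (board : List (List Int)) (st : List Int × List Int × Int) (m : Int) : List Int × List Int × Int :=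
  let (idx, basket, ans) := st
  let col := m - 1
  match PySem.List.pyGet? idx col with
  | none => st          -- idx[col] IndexError: outside Pre_
  | some i0 =>
    let i := skipZeros board col i0
    if i < (board.length : Int) then
      let doll := PySem.List.pyGetD (PySem.List.pyGetD board i []) col 0   -- board[i][col]
      let idx' := PySem.List.pySetD idx col (i + 1)
      if basket ≠ [] ∧ PySem.List.pyGetD basket (-1) 0 = doll then
        (idx', basket.dropLast, ans + 2)
      else
        (idx', basket ++ [doll], ans)
    else st

def solution_alt (board : List (List Int)) (moves : List Int) : Int :=
  let w := (board.headD []).length          -- len(board[0]) if board else 0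
  (moves.foldl (stepB board) (List.replicate w (0 : Int), [], 0)).2.2

-- ===== PRECONDITION & SPEC =====
-- Pre_ requires a rectangular board (A's zip silently truncates ragged boards to the
-- shortest row — an artefact B does not reproduce) and moves that index an existing
-- column (otherwise A raises IndexError on board[m-1]).
def Pre_solution (board : List (List Int)) (moves : List Int) : Prop :=
  (∀ row ∈ board, row.length = (board.headD []).length) ∧
  (∀ m ∈ moves, 1 - ((board.headD []).length : Int) ≤ m ∧ m ≤ ((board.headD []).length : Int))
instance (board : List (List Int)) (moves : List Int) : Decidable (Pre_solution board moves) := by unfold Pre_solution; infer_instance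

def pvWitness_solution : List (List Int) × List Int :=
  ([[0, 0, 0, 0, 0], [0, 0, 1, 0, 3], [0, 2, 5, 0, 1], [4, 2, 4, 4, 2], [3, 5, 1, 3, 1]],
   [1, 5, 3, 5, 1, 2, 1, 4])

def Spec_solution (board : List (List Int)) (moves : List Int) (out : Int) : Prop := out = solution_alt board moves
instance (board : List (List Int)) (moves : List Int) (out : Int) : Decidable (Spec_solution board moves out) := by unfold Spec_solution; infer_instance

-- ===== CLAIM =====
def Claim_equal_solution : Prop := ∀ (board : List (List Int)) (moves : List Int), Dom_solution board moves → Pre_solution board moves → Spec_solution board moves (solution board moves)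

-- ===== LEMMAS AND PROOFS =====


-- the column of `board` under index j, read top-to-bottom (missing entries read 0; unused on rectangular boards)
def colL (board : List (List Int)) (j : Nat) : List Int := board.map (fun r => r.getD j 0)

-- Python-normalised index for a list of length w
def normIdx (w : Nat) (raw : Int) : Nat := (if raw < 0 then raw + w else raw).toNat

lemma headI_eq_getD (r : List Int) : r.headI = r.getD 0 0 := by cases r <;> rfl

lemma tail_getD (r : List Int) (c : Nat) : r.tail.getD c 0 = r.getD (c + 1) 0 := by cases r <;> rfl

lemma pyZipCols_eq (w : Nat) : ∀ rows : List (List Int), rows ≠ [] → (∀ r ∈ rows, r.length = w) →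
    pyZipCols rows = (List.range w).map (fun c => rows.map (fun r => r.getD c 0)) := by
  induction w with
  | zero =>
    intro rows hne hlen
    match rows with
    | r :: rs =>
      have hr : r = [] := List.eq_nil_of_length_eq_zero (hlen r (by simp))
      unfold pyZipCols
      simp [hr]
  | succ w ih =>
    intro rows hne hlen
    match rows with
    | r :: rs =>
      have hall : ((r :: rs).all (fun x => !x.isEmpty)) = true := by
        simp only [List.all_eq_true]
        intro x hx
        have := hlen x hx
        simp
        intro hxe; rw [hxe] at this; simp at this
      unfold pyZipCols
      rw [dif_pos hall]
      rw [ih ((r :: rs).map (fun x => x.tail)) (by simp) ?_]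
      · rw [List.range_succ_eq_map]
        simp only [List.map_cons, List.map_map, Function.comp_def, headI_eq_getD,
          tail_getD, Nat.succ_eq_add_one]
      · intro t ht
        simp only [List.mem_map] at ht
        obtain ⟨x, hx, rfl⟩ := ht
        have := hlen x hx
        simp [List.length_tail, this]

lemma filter_erase_zero (arr : List Int) (h : (0:Int) ∈ arr) :
    (arr.erase 0).filter (· ≠ 0) = arr.filter (· ≠ 0) := by
  obtain ⟨l1, l2, hnm, heq, herase⟩ := List.exists_erase_eq h
  rw [herase, heq]
  simp [List.filter_append]

lemma removeZeros_eq : ∀ (k : Nat) (arr : List Int), PySem.List.count arr 0 = k →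
    (List.range k).foldl (fun a _ => (PySem.List.remove? a 0).getD a) arr = arr.filter (· ≠ 0) := by
  intro k
  induction k with
  | zero =>
    intro arr hc
    rw [PySem.List.count_eq] at hc
    have h0 : (0:Int) ∉ arr := by
      intro hm; have := List.count_pos_iff.mpr hm; omega
    simp only [List.range_zero, List.foldl_nil]
    symm
    apply List.filter_eq_self.mpr
    intro a ha
    simp only [decide_eq_true_eq]
    intro hz; rw [hz] at ha; exact h0 ha
  | succ k ih =>
    intro arr hc
    have hmem : (0:Int) ∈ arr := by
      rw [PySem.List.count_eq] at hc
      by_contra hn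
      rw [List.count_eq_zero.mpr hn] at hc
      omega
    rw [List.range_succ_eq_map, List.foldl_cons, List.foldl_map]
    rw [PySem.List.remove?_eq_some_erase arr 0 hmem]
    simp only [Option.getD_some]
    rw [ih (arr.erase 0) ?_]
    · exact filter_erase_zero arr hmem
    · rw [PySem.List.count_eq] at hc ⊢
      rw [List.count_erase_self]
      omega

lemma normIdx_lt (w : Nat) (raw : Int) (h1 : -(w:Int) ≤ raw) (h2 : raw < w) : normIdx w raw < w := by
  unfold normIdx; split <;> omega

lemma pyGet?_norm {α : Type} (xs : List α) (w : Nat) (raw : Int) (hlen : xs.length = w)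
    (h1 : -(w:Int) ≤ raw) (h2 : raw < w) :
    PySem.List.pyGet? xs raw = xs[normIdx w raw]? := by
  by_cases h0 : 0 ≤ raw
  · rw [PySem.List.pyGet?_of_nonneg xs h0]
    congr 1
    unfold normIdx; split <;> omega
  · have hk : raw = -(((-raw).toNat : Nat) : Int) := by omega
    rw [hk, PySem.List.pyGet?_neg_natCast xs (-raw).toNat (by omega) (by omega)]
    congr 1
    unfold normIdx; split <;> omega

lemma pyGetD_norm (xs : List Int) (w : Nat) (raw : Int) (d : Int) (hlen : xs.length = w)
    (h1 : -(w:Int) ≤ raw) (h2 : raw < w) :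
    PySem.List.pyGetD xs raw d = xs.getD (normIdx w raw) d := by
  have hw : normIdx w raw < w := normIdx_lt w raw h1 h2
  by_cases h0 : 0 ≤ raw
  · have hidx : normIdx w raw = raw.toNat := by unfold normIdx; split <;> omega
    rw [hidx, PySem.List.pyGetD_eq_getElem xs d h0 (by omega),
      List.getD_eq_getElem xs d (by omega)]
  · have hk : raw = -(((-raw).toNat : Nat) : Int) := by omega
    have hidx : normIdx w raw = xs.length - (-raw).toNat := by unfold normIdx; split <;> omega
    rw [hidx, hk, PySem.List.pyGetD_neg_natCast xs (-raw).toNat d (by omega) (by omega),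
      List.getD_eq_getElem xs d (by omega)]
    congr 1
    omega

lemma pySetD_neg {α : Type} (xs : List α) (k : Nat) (v : α) (h1 : 0 < k) (h2 : k ≤ xs.length) :
    PySem.List.pySetD xs (-(k:Int)) v = xs.set (xs.length - k) v := by
  unfold PySem.List.pySetD PySem.List.pySet? PySem.List.pyIdx?
  split <;> rename_i hc
  · omega
  · split <;> [skip; omega]
    simp

lemma pySetD_norm {α : Type} (xs : List α) (w : Nat) (raw : Int) (v : α) (hlen : xs.length = w)
    (h1 : -(w:Int) ≤ raw) (h2 : raw < w) :
    PySem.List.pySetD xs raw v = xs.set (normIdx w raw) v := by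
  by_cases h0 : 0 ≤ raw
  · rw [PySem.List.pySetD_of_nonneg xs v h0]
    congr 1
    unfold normIdx; split <;> omega
  · have hk : raw = -(((-raw).toNat : Nat) : Int) := by omega
    have hidx : normIdx w raw = xs.length - (-raw).toNat := by unfold normIdx; split <;> omega
    rw [hidx, hk, pySetD_neg xs (-raw).toNat v (by omega) (by omega)]
    congr 1
    omega

lemma colL_getD (board : List (List Int)) (j i : Nat) (h : i < board.length) :
    (colL board j).getD i 0 = board[i].getD j 0 := by
  unfold colL
  rw [List.getD_eq_getElem _ _ (by simpa using h), List.getElem_map]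

lemma colL_length (board : List (List Int)) (j : Nat) : (colL board j).length = board.length := by
  simp [colL]

lemma skip_at_end (board : List (List Int)) (raw : Int) (i : Nat) (h : board.length ≤ i) :
    skipZeros board raw (i : Int) = (i : Int) := by
  unfold skipZeros
  rw [dif_neg (by exact_mod_cast Nat.not_lt.mpr h)]

lemma skip_spec (board : List (List Int)) (w : Nat) (raw : Int)
    (hrect : ∀ r ∈ board, r.length = w) (h1 : -(w:Int) ≤ raw) (h2 : raw < w) :
    ∀ fuel i : Nat, board.length - i ≤ fuel → i ≤ board.length →
    (( ((colL board (normIdx w raw)).drop i).filter (· ≠ 0) = [] →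
        skipZeros board raw i = (board.length : Int)) ∧
     ∀ d rest, ((colL board (normIdx w raw)).drop i).filter (· ≠ 0) = d :: rest →
        ∃ i' : Nat, skipZeros board raw (i : Int) = (i' : Int) ∧ i ≤ i' ∧ i' < board.length ∧
          (colL board (normIdx w raw)).getD i' 0 = d ∧
          ((colL board (normIdx w raw)).drop (i' + 1)).filter (· ≠ 0) = rest) := by
  intro fuel
  induction fuel with
  | zero =>
    intro i hfi hi
    have hieq : i = board.length := by omega
    have hdrop : (colL board (normIdx w raw)).drop i = [] := by
      apply List.drop_eq_nil_of_le
      rw [colL_length]; omega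
    rw [hdrop]
    constructor
    · intro _
      rw [skip_at_end board raw i (by omega), hieq]
    · intro d rest hdr
      simp at hdr
  | succ fuel ih =>
    intro i hfi hi
    by_cases hin : i < board.length
    · -- one unfolding of the while loop
      have hrow : PySem.List.pyGet? board (i : Int) = some board[i] := by
        rw [PySem.List.pyGet?_natCast, List.getElem?_eq_getElem hin]
      have hrl : board[i].length = w := hrect _ (List.getElem_mem hin)
      have hent : PySem.List.pyGet? board[i] raw = some (board[i].getD (normIdx w raw) 0) := by
        rw [pyGet?_norm board[i] w raw hrl h1 h2,
          List.getElem?_eq_getElem (by rw [hrl]; exact normIdx_lt w raw h1 h2),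
          List.getD_eq_getElem _ _ (by rw [hrl]; exact normIdx_lt w raw h1 h2)]
      have hCi : (colL board (normIdx w raw)).getD i 0 = board[i].getD (normIdx w raw) 0 :=
        colL_getD board _ i hin
      have hdrop : (colL board (normIdx w raw)).drop i =
          (colL board (normIdx w raw)).getD i 0 :: (colL board (normIdx w raw)).drop (i + 1) := by
        rw [List.getD_eq_getElem _ _ (by rw [colL_length]; omega)]
        exact List.drop_eq_getElem_cons (by rw [colL_length]; omega)
      have hunf : skipZeros board raw (i : Int) =
          (if board[i].getD (normIdx w raw) 0 = 0 then skipZeros board raw ((i : Int) + 1) else (i : Int)) := by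
        conv_lhs => rw [skipZeros.eq_def]
        rw [dif_pos (by exact_mod_cast hin)]
        simp only [hrow, hent]
      by_cases he : board[i].getD (normIdx w raw) 0 = 0
      · -- zero cell: skip it
        have hstep : skipZeros board raw (i : Int) = skipZeros board raw ((i + 1 : Nat) : Int) := by
          rw [hunf, if_pos he]; push_cast; ring_nf
        have hfilter : ((colL board (normIdx w raw)).drop i).filter (· ≠ 0) =
            ((colL board (normIdx w raw)).drop (i + 1)).filter (· ≠ 0) := by
          rw [hdrop, hCi, he]
          simp
        obtain ⟨ih1, ih2⟩ := ih (i + 1) (by omega) (by omega)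
        constructor
        · intro hemp
          rw [hstep]
          exact ih1 (by rw [← hfilter]; exact hemp)
        · intro d rest hdr
          obtain ⟨i', h1', h2', h3', h4', h5'⟩ := ih2 d rest (by rw [← hfilter]; exact hdr)
          exact ⟨i', by rw [hstep]; exact h1', by omega, h3', h4', h5'⟩
      · -- nonzero cell: stop here
        have hstop : skipZeros board raw (i : Int) = (i : Int) := by rw [hunf, if_neg he]
        have hfilter : ((colL board (normIdx w raw)).drop i).filter (· ≠ 0) =
            (colL board (normIdx w raw)).getD i 0 :: ((colL board (normIdx w raw)).drop (i + 1)).filter (· ≠ 0) := by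
          rw [hdrop]
          rw [List.filter_cons_of_pos (by simp only [ne_eq, decide_eq_true_eq]; rw [hCi]; exact he)]
        constructor
        · intro hemp
          rw [hfilter] at hemp
          simp at hemp
        · intro d rest hdr
          rw [hfilter] at hdr
          injection hdr with hd hr
          exact ⟨i, hstop, le_refl i, hin, by rw [hCi] at hd ⊢; exact hd ▸ rfl, hr⟩
    · have hieq : i = board.length := by omega
      have hdrop : (colL board (normIdx w raw)).drop i = [] := by
        apply List.drop_eq_nil_of_le
        rw [colL_length]; omega
      rw [hdrop]
      exact ⟨fun _ => by rw [skip_at_end board raw i (by omega), hieq], fun d rest hdr => by simp at hdr⟩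

def InvSt (board : List (List Int)) (w : Nat)
    (stA : List (List Int) × List Int × Int) (stB : List Int × List Int × Int) : Prop :=
  stA.1.length = w ∧ stB.1.length = w ∧
  stA.2.1 = 0 :: stB.2.1 ∧ stA.2.2 = stB.2.2 ∧
  (∀ x ∈ stB.2.1, x ≠ (0:Int)) ∧
  (∀ c : Nat, c < w → ∃ i : Nat, i ≤ board.length ∧ stB.1.getD c 0 = (i : Int) ∧
     stA.1.getD c [] = (((colL board c).drop i).filter (· ≠ 0)).reverse)

lemma getD_set_self (l : List Int) (i : Nat) (v : Int) (h : i < l.length) :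
    (l.set i v).getD i 0 = v := by
  rw [List.getD_eq_getElem _ _ (by simpa using h)]
  exact List.getElem_set_self (by simpa using h)

lemma getD_set_self' (l : List (List Int)) (i : Nat) (v : List Int) (h : i < l.length) :
    (l.set i v).getD i [] = v := by
  rw [List.getD_eq_getElem _ _ (by simpa using h)]
  exact List.getElem_set_self (by simpa using h)

lemma getD_set_ne (l : List Int) (i j : Nat) (v : Int) (hne : i ≠ j) (h : j < l.length) :
    (l.set i v).getD j 0 = l.getD j 0 := by
  rw [List.getD_eq_getElem _ _ (by simpa using h), List.getD_eq_getElem _ _ h]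
  exact List.getElem_set_ne hne (by simpa using h)

lemma getD_set_ne' (l : List (List Int)) (i j : Nat) (v : List Int) (hne : i ≠ j) (h : j < l.length) :
    (l.set i v).getD j [] = l.getD j [] := by
  rw [List.getD_eq_getElem _ _ (by simpa using h), List.getD_eq_getElem _ _ h]
  exact List.getElem_set_ne hne (by simpa using h)

lemma step_inv (board : List (List Int)) (w : Nat) (m : Int)
    (hrect : ∀ r ∈ board, r.length = w)
    (hm1 : 1 - (w:Int) ≤ m) (hm2 : m ≤ w)
    (stA : List (List Int) × List Int × Int) (stB : List Int × List Int × Int)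
    (h : InvSt board w stA stB) :
    InvSt board w (stepA stA m) (stepB board stB m) := by
  obtain ⟨bd, cs, ansA⟩ := stA
  obtain ⟨idx, bas, ansB⟩ := stB
  obtain ⟨hlA, hlB, hcs, hans, hnz, hcols⟩ := h
  simp only at hlA hlB hcs hans hnz hcols
  have hw0 : 0 < w := by omega
  have hr1 : -(w:Int) ≤ m - 1 := by omega
  have hr2 : m - 1 < (w:Int) := by omega
  have hj := normIdx_lt w (m - 1) hr1 hr2
  obtain ⟨i, hin, hiv, hcv⟩ := hcols (normIdx w (m - 1)) hj
  have hbd : PySem.List.pyGet? bd (m - 1) = some (bd.getD (normIdx w (m - 1)) []) := by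
    rw [pyGet?_norm bd w (m - 1) hlA hr1 hr2, List.getElem?_eq_getElem (by omega),
        List.getD_eq_getElem _ _ (by omega)]
  have hidx : PySem.List.pyGet? idx (m - 1) = some (idx.getD (normIdx w (m - 1)) 0) := by
    rw [pyGet?_norm idx w (m - 1) hlB hr1 hr2, List.getElem?_eq_getElem (by omega),
        List.getD_eq_getElem _ _ (by omega)]
  have hspec := skip_spec board w (m - 1) hrect hr1 hr2 (board.length - i) i (le_refl _) hin
  cases hfc : ((colL board (normIdx w (m - 1))).drop i).filter (· ≠ 0) with
  | nil =>
    have hskip : skipZeros board (m - 1) (i : Int) = (board.length : Int) := hspec.1 hfc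
    have eA : stepA (bd, cs, ansA) m = (bd, cs, ansA) := by
      simp only [stepA, hbd]
      rw [if_pos (by rw [hcv, hfc]; rfl)]
    have eB : stepB board (idx, bas, ansB) m = (idx, bas, ansB) := by
      simp only [stepB, hidx, hiv, hskip]
      rw [if_neg (by omega)]
    rw [eA, eB]
    exact ⟨hlA, hlB, hcs, hans, hnz, hcols⟩
  | cons d rest =>
    have hd0 : d ≠ 0 := by
      have hmem : d ∈ ((colL board (normIdx w (m - 1))).drop i).filter (· ≠ 0) := by
        rw [hfc]; simp
      simpa using List.of_mem_filter hmem
    obtain ⟨i', hsz, hii', hi'n, hCd, hrest⟩ := hspec.2 d rest hfc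
    have hcolA : bd.getD (normIdx w (m - 1)) [] = rest.reverse ++ [d] := by
      rw [hcv, hfc]; simp
    have hpop : PySem.List.pop? (rest.reverse ++ [d]) (-1) = some (d, rest.reverse) :=
      PySem.List.pop?_last _ _
    have hset : PySem.List.pySetD bd (m - 1) rest.reverse
        = bd.set (normIdx w (m - 1)) rest.reverse := pySetD_norm bd w (m - 1) _ hlA hr1 hr2
    have hdoll : PySem.List.pyGetD (PySem.List.pyGetD board (i' : Int) []) (m - 1) 0 = d := by
      rw [PySem.List.pyGetD_eq_getElem board [] (by omega) (by exact_mod_cast hi'n)]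
      simp only [Int.toNat_natCast]
      rw [pyGetD_norm board[i'] w (m - 1) 0 (hrect _ (List.getElem_mem hi'n)) hr1 hr2,
        ← colL_getD board _ i' hi'n]
      exact hCd
    have hsetB : PySem.List.pySetD idx (m - 1) ((i' : Int) + 1)
        = idx.set (normIdx w (m - 1)) ((i' : Int) + 1) := pySetD_norm idx w (m - 1) _ hlB hr1 hr2
    have eA : stepA (bd, cs, ansA) m =
        (if PySem.List.pyGetD cs (-1) 0 = d
         then (bd.set (normIdx w (m - 1)) rest.reverse, cs.dropLast, ansA + 2)
         else (bd.set (normIdx w (m - 1)) rest.reverse, cs ++ [d], ansA)) := by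
      simp only [stepA, hbd, hcolA, hpop, hset]
      rw [if_neg (by simp)]
    have eB : stepB board (idx, bas, ansB) m =
        (if bas ≠ [] ∧ PySem.List.pyGetD bas (-1) 0 = d
         then (idx.set (normIdx w (m - 1)) ((i' : Int) + 1), bas.dropLast, ansB + 2)
         else (idx.set (normIdx w (m - 1)) ((i' : Int) + 1), bas ++ [d], ansB)) := by
      simp only [stepB, hidx, hiv, hsz, hdoll, hsetB]
      rw [if_pos (by exact_mod_cast hi'n)]
    have hcolsnew : ∀ c : Nat, c < w → ∃ i2 : Nat, i2 ≤ board.length ∧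
        (idx.set (normIdx w (m - 1)) ((i' : Int) + 1)).getD c 0 = (i2 : Int) ∧
        (bd.set (normIdx w (m - 1)) rest.reverse).getD c []
          = (((colL board c).drop i2).filter (· ≠ 0)).reverse := by
      intro c hc
      by_cases hcj : normIdx w (m - 1) = c
      · subst hcj
        refine ⟨i' + 1, by omega, ?_, ?_⟩
        · rw [getD_set_self idx _ _ (by omega)]; push_cast; ring
        · rw [getD_set_self' bd _ _ (by omega), hrest]
      · obtain ⟨i2, h1, h2, h3⟩ := hcols c hc
        exact ⟨i2, h1, by rw [getD_set_ne idx _ _ _ hcj (by omega)]; exact h2,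
          by rw [getD_set_ne' bd _ _ _ hcj (by omega)]; exact h3⟩
    have hcond : (PySem.List.pyGetD cs (-1) 0 = d) ↔ (bas ≠ [] ∧ PySem.List.pyGetD bas (-1) 0 = d) := by
      subst hcs
      cases bas with
      | nil =>
        rw [PySem.List.pyGetD_neg_one _ _ (by simp)]
        simp only [List.getLast_singleton, ne_eq, not_true_eq_false, false_and, iff_false]
        exact fun hh => hd0 hh.symm
      | cons b bs =>
        rw [PySem.List.pyGetD_neg_one _ _ (by simp),
          PySem.List.pyGetD_neg_one (b :: bs) 0 (by simp), List.getLast_cons_cons]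
        simp
    rw [eA, eB]
    by_cases hb : bas ≠ [] ∧ PySem.List.pyGetD bas (-1) 0 = d
    · rw [if_pos (hcond.mpr hb), if_pos hb]
      refine ⟨by simpa using hlA, by simpa using hlB, ?_, by simpa using by omega, ?_, hcolsnew⟩
      · obtain ⟨b, bs, rfl⟩ : ∃ b bs, bas = b :: bs := by
          cases bas with
          | nil => exact absurd rfl hb.1
          | cons b bs => exact ⟨b, bs, rfl⟩
        rw [hcs]
        exact List.dropLast_cons₂
      · intro x hx
        exact hnz x (List.mem_of_mem_dropLast hx)
    · rw [if_neg (fun hh => hb (hcond.mp hh)), if_neg hb]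
      refine ⟨by simpa using hlA, by simpa using hlB, ?_, by simpa using hans, ?_, hcolsnew⟩
      · rw [hcs]; rfl
      · intro x hx
        rcases List.mem_append.mp hx with hx | hx
        · exact hnz x hx
        · simpa using (by simpa using hx : x = d) ▸ hd0

lemma loop_inv (board : List (List Int)) (w : Nat)
    (hrect : ∀ r ∈ board, r.length = w) :
    ∀ (moves : List Int) stA stB,
    (∀ m ∈ moves, 1 - (w:Int) ≤ m ∧ m ≤ w) → InvSt board w stA stB →
    (moves.foldl stepA stA).2.2 = (moves.foldl (stepB board) stB).2.2 := by
  intro moves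
  induction moves with
  | nil => intro stA stB _ h; exact h.2.2.2.1
  | cons m ms ih =>
    intro stA stB hmv h
    simp only [List.foldl_cons]
    exact ih _ _ (fun x hx => hmv x (by simp [hx]))
      (step_inv board w m hrect (hmv m (by simp)).1 (hmv m (by simp)).2 stA stB h)

lemma init_inv (board : List (List Int)) (w : Nat) (hw : w = (board.headD []).length)
    (hrect : ∀ r ∈ board, r.length = w) :
    InvSt board w
      ((pyZipCols board.reverse).map (fun arr =>
          (List.range (PySem.List.count arr 0)).foldl
            (fun a _ => (PySem.List.remove? a 0).getD a) arr), [0], 0)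
      (List.replicate w (0:Int), [], 0) := by
  cases board with
  | nil =>
    have hw0 : w = 0 := by simpa using hw
    subst hw0
    exact ⟨by simp [pyZipCols], by simp, rfl, rfl, by simp, fun c hc => absurd hc (by omega)⟩
  | cons r0 rs =>
    have hzip : pyZipCols (r0 :: rs).reverse
        = (List.range w).map (fun c => (r0 :: rs).reverse.map (fun r => r.getD c 0)) :=
      pyZipCols_eq w _ (by simp) (fun r hr => hrect r (List.mem_reverse.mp hr))
    have hb2 : (pyZipCols (r0 :: rs).reverse).map (fun arr =>
          (List.range (PySem.List.count arr 0)).foldl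
            (fun a _ => (PySem.List.remove? a 0).getD a) arr)
        = (List.range w).map (fun c => (((colL (r0 :: rs) c).filter (· ≠ 0)).reverse)) := by
      rw [hzip, List.map_map]
      apply List.map_congr_left
      intro c _
      simp only [Function.comp_apply]
      rw [removeZeros_eq _ _ rfl]
      unfold colL
      rw [← List.filter_reverse, List.map_reverse]
    refine ⟨by rw [hb2]; simp, by simp, rfl, rfl, by simp, ?_⟩
    intro c hc
    refine ⟨0, by omega, ?_, ?_⟩
    · rw [List.getD_eq_getElem _ _ (by simpa using hc)]
      simp
    · rw [hb2, List.getD_eq_getElem _ _ (by simpa using hc)]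
      simp only [List.getElem_map, List.getElem_range, List.drop_zero]

-- ===== VERDICT =====
theorem solution_spec : Claim_equal_solution := by
  intro board moves _ hpre
  obtain ⟨hrect, hmv⟩ := hpre
  unfold Spec_solution solution solution_alt
  exact loop_inv board _ hrect moves _ _ hmv
    (init_inv board _ rfl hrect)
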